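-- pv_equiv track=rewrite | github.com/HAAIL-Universe/Othello | core/othello_engine.py | _describe_energy_load
-- ===== SOURCE A (Python) =====
-- from typing import Any, Dict, List, Optional
--
-- def _describe_energy_load(tasks: List[Dict[str, Any]]) -> str:
--     heavy = sum(1 for t in tasks if t.get("effort") == "heavy")
--     medium = sum(1 for t in tasks if t.get("effort") == "medium")
--     if heavy >= 2:
--         return "two heavy blocks"
--     if heavy == 1 and medium >= 1:
--         return "one heavy and one medium block"
--     if heavy == 1:
--         return "one heavy block"
--     if medium >= 2:
--         return "two medium blocks"
--     if medium == 1: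
--         return "one medium block"
--     return "light load"
-- ===== SOURCE B (Python) =====
-- from typing import Any, Dict, List, Optional
--
-- _LOAD_TABLE = {
--     (2, 0): "two heavy blocks",
--     (2, 1): "two heavy blocks",
--     (2, 2): "two heavy blocks",
--     (1, 1): "one heavy and one medium block",
--     (1, 2): "one heavy and one medium block",
--     (1, 0): "one heavy block",
--     (0, 2): "two medium blocks",
--     (0, 1): "one medium block",
--     (0, 0): "light load",
-- }
--
-- def _describe_energy_load(tasks: List[Dict[str, Any]]) -> str:
--     heavy = medium = 0
--     for t in tasks:
--         e = t.get("effort")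
--         if e == "heavy":
--             heavy += 1
--         elif e == "medium":
--             medium += 1
--     return _LOAD_TABLE[(min(heavy, 2), min(medium, 2))]
-- ===== Notes on version B (the rewrite author's own statement) =====
-- stated objective: alternative
-- what changed: Replaces A's two generator passes and five-branch if-ladder by a single counting pass over the tasks and a literal 9-entry lookup table indexed by the clamped counts (min(heavy,2), min(medium,2)).
import Mathlib
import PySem

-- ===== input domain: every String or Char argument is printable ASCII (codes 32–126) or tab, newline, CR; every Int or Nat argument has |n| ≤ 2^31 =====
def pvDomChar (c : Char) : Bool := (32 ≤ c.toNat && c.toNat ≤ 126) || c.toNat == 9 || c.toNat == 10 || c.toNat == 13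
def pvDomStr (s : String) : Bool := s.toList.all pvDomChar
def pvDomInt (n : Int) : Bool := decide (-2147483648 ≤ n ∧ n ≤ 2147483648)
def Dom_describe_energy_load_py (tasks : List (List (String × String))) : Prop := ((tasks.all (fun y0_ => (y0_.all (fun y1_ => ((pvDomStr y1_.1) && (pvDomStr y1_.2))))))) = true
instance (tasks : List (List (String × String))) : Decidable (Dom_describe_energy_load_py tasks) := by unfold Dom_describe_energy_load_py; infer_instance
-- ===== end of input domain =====

-- B replaces A's if-ladder by one pass over the tasks and a literal lookup table on clamped counts (objective: alternative decomposition).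

-- t.get("effort"): first-match association-list lookup (shared dict primitive of both ports)
def pvGetEffort (t : List (String × String)) : Option String := (PySem.Dict.mk t).get? "effort"

-- ===== PORT A =====
def describe_energy_load_py (tasks : List (List (String × String))) : String :=
  let heavy : Int := tasks.foldl (fun acc t => acc + (if pvGetEffort t = some "heavy" then 1 else 0)) 0
  let medium : Int := tasks.foldl (fun acc t => acc + (if pvGetEffort t = some "medium" then 1 else 0)) 0
  if heavy ≥ 2 then "two heavy blocks"
  else if heavy = 1 ∧ medium ≥ 1 then "one heavy and one medium block"
  else if heavy = 1 then "one heavy block"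
  else if medium ≥ 2 then "two medium blocks"
  else if medium = 1 then "one medium block"
  else "light load"

-- ===== PORT B =====
def pvLoadTable : PySem.Dict (Int × Int) String := PySem.Dict.ofList
  [((2, 0), "two heavy blocks"), ((2, 1), "two heavy blocks"), ((2, 2), "two heavy blocks"),
   ((1, 1), "one heavy and one medium block"), ((1, 2), "one heavy and one medium block"),
   ((1, 0), "one heavy block"),
   ((0, 2), "two medium blocks"), ((0, 1), "one medium block"), ((0, 0), "light load")]

-- table[(min(heavy,2), min(medium,2))]: the key is always present, so the KeyError branch
-- (get? = none) is unreachable; .getD "" ports the total lookup.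
def describe_energy_load_py_alt (tasks : List (List (String × String))) : String :=
  let hm : Int × Int := tasks.foldl (fun hm t =>
      match pvGetEffort t with
      | some "heavy" => (hm.1 + 1, hm.2)
      | some "medium" => (hm.1, hm.2 + 1)
      | _ => hm) (0, 0)
  (pvLoadTable.get? (min hm.1 2, min hm.2 2)).getD ""

-- ===== PRECONDITION & SPEC =====
def Spec_describe_energy_load_py (tasks : List (List (String × String))) (out : String) : Prop := out = describe_energy_load_py_alt tasks
instance (tasks : List (List (String × String))) (out : String) : Decidable (Spec_describe_energy_load_py tasks out) := by unfold Spec_describe_energy_load_py; infer_instance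

-- ===== CLAIM (what is proved, stated in full; the proofs are below) =====
def Claim_equal_describe_energy_load_py : Prop := ∀ (tasks : List (List (String × String))), Dom_describe_energy_load_py tasks → Spec_describe_energy_load_py tasks (describe_energy_load_py tasks)

-- ===== LEMMAS AND PROOFS =====

-- B's single pass computes exactly A's two counts (shifted by the accumulator).
lemma pv_pairfold (tasks : List (List (String × String))) (h m : Int) :
    tasks.foldl (fun hm t =>
      match pvGetEffort t with
      | some "heavy" => (hm.1 + 1, hm.2)
      | some "medium" => (hm.1, hm.2 + 1)
      | _ => hm) (h, m)
    = (h + tasks.foldl (fun acc t => acc + (if pvGetEffort t = some "heavy" then 1 else 0)) 0,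
       m + tasks.foldl (fun acc t => acc + (if pvGetEffort t = some "medium" then 1 else 0)) 0) := by
  induction tasks generalizing h m with
  | nil => simp [List.foldl]
  | cons t ts ih =>
    simp only [List.foldl_cons]
    split <;> rename_i heq <;>
      simp_all [PySem.List.foldl_add] <;> ring

-- A's counts are nonnegative.
lemma pv_count_nonneg (tasks : List (List (String × String))) (p : List (String × String) → Prop)
    [DecidablePred p] :
    0 ≤ tasks.foldl (fun acc t => acc + (if p t then (1:Int) else 0)) 0 := by
  rw [PySem.List.foldl_add]
  simp only [zero_add]
  apply List.sum_nonneg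
  intro x hx
  simp only [List.mem_map] at hx
  obtain ⟨t, -, rfl⟩ := hx
  split_ifs <;> omega

-- The table on clamped counts agrees with the if-ladder, for all nonnegative counts.
lemma pv_table_cases (heavy medium : Int) (hh : 0 ≤ heavy) (hm : 0 ≤ medium) :
    (if heavy ≥ 2 then "two heavy blocks"
     else if heavy = 1 ∧ medium ≥ 1 then "one heavy and one medium block"
     else if heavy = 1 then "one heavy block"
     else if medium ≥ 2 then "two medium blocks"
     else if medium = 1 then "one medium block"
     else "light load")
    = (pvLoadTable.get? (min heavy 2, min medium 2)).getD "" := by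
  rcases (show heavy = 0 ∨ heavy = 1 ∨ 2 ≤ heavy by omega) with h | h | h <;>
  rcases (show medium = 0 ∨ medium = 1 ∨ 2 ≤ medium by omega) with m | m | m <;>
  first
    | (subst h; subst m; decide)
    | (try subst h); (try subst m) <;>
      (try rw [show min heavy 2 = 2 from min_eq_right h]) <;>
      (try rw [show min medium 2 = 2 from min_eq_right m]) <;>
      split_ifs <;> first | decide | omega

-- ===== VERDICT (by name: the statement is the Claim_ definition above) =====
theorem describe_energy_load_py_spec : Claim_equal_describe_energy_load_py := by
  intro tasks _
  unfold Spec_describe_energy_load_py describe_energy_load_py describe_energy_load_py_alt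
  rw [pv_pairfold]
  simp only [zero_add]
  exact pv_table_cases _ _ (pv_count_nonneg tasks _) (pv_count_nonneg tasks _)
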